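-- pv_equiv track=rewrite | github.com/Mark-Hopkins-at-Williams/thesis-yilin-li | EM_algorithm/em.py | Estep_helper
-- ===== SOURCE A (Python) =====
-- def Estep_helper(data):
--     # - data is a list of strings generated from DataGenerator
--     data = sorted(data, key = len)
--     mem = dict()
--     # a dict of string:list[(#aa,#a,#b,prob)] where the list contains all permutations
--
--     def findAllPerm(s):
--         # returns a list of tuple (# of "aa", # of "a", # of "b")
--         if s == "":
--             return [(0, 0, 0)] # (#"aa", #"a", #"b")
--         if s in mem:
--             return mem[s]
--         elif len(s) > 1 and s[:2] == "aa":
--             first = [(i[0], i[1]+1, i[2]) for i in findAllPerm(s[1:])]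
--             second = [(i[0]+1, i[1], i[2]) for i in findAllPerm(s[2:])]
--             result = first + second
--             mem[s] = result
--             return result
--         else:
--             if s[0] == "a":
--                 result = [(i[0], i[1]+1, i[2]) for i in findAllPerm(s[1:])]
--             else:
--                 result = [(i[0], i[1], i[2]+1) for i in findAllPerm(s[1:])]
--             mem[s] = result
--             return result
--
--     result = []
--     for d in data:
--         perm = findAllPerm(d)
--         result.append(perm)
--     return result
-- ===== SOURCE B (Python) =====
-- def Estep_helper(data):
--     # Bottom-up suffix DP per string (no memo dict, no recursion); same stable
--     # length sort and same branch order, so outputs match A element-for-element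
--     # (alternative decomposition with the same asymptotic cost; A additionally
--     # memoizes across duplicate strings).
--     data = sorted(data, key=len)
--     out = []
--     for s in data:
--         n = len(s)
--         dp = [None] * (n + 1)
--         dp[n] = [(0, 0, 0)]
--         for i in range(n - 1, -1, -1):
--             if s[i] == 'a' and i + 1 < n and s[i + 1] == 'a':
--                 dp[i] = [(x, y + 1, z) for (x, y, z) in dp[i + 1]] + \
--                         [(x + 1, y, z) for (x, y, z) in dp[i + 2]]
--             elif s[i] == 'a':
--                 dp[i] = [(x, y + 1, z) for (x, y, z) in dp[i + 1]]
--             else: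
--                 dp[i] = [(x, y, z + 1) for (x, y, z) in dp[i + 1]]
--         out.append(dp[0])
--     return out
-- ===== Notes on version B (the rewrite author's own statement) =====
-- stated objective: alternative
-- what changed: Replaces the string-keyed memoized recursion shared across strings with a per-string bottom-up suffix DP array, removing the recursion, the memo dict and all string slicing.
import Mathlib
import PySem

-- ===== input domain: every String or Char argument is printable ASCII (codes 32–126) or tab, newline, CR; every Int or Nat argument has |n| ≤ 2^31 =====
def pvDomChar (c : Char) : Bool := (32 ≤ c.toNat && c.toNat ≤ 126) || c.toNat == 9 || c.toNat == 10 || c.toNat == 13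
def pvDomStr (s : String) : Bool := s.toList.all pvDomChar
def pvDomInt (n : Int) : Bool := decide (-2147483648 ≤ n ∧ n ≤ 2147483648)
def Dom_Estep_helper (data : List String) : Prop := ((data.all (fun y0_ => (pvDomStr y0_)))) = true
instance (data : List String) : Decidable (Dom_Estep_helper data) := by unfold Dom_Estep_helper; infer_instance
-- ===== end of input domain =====

-- B replaces A's string-keyed memoized recursion by a per-string bottom-up suffix DP (objective: alternative decomposition, same values in the same order).

-- ===== PORT A =====
-- A's inner findAllPerm: recursion on the suffix, threading the memo dict (keys are the suffix strings, kept as List Char).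
def fapA (s : List Char) (mem : PySem.Dict (List Char) (List (Int × Int × Int))) :
    List (Int × Int × Int) × PySem.Dict (List Char) (List (Int × Int × Int)) :=
  match s with
  | [] => ([(0, 0, 0)], mem)
  | c :: rest =>
    match mem.get? (c :: rest) with
    | some v => (v, mem)
    | none =>
      if (c :: rest).length > 1 ∧ (c :: rest).take 2 = ['a', 'a'] then
        let p1 := fapA rest mem
        let p2 := fapA rest.tail p1.2
        let result := (p1.1.map fun i => (i.1, i.2.1 + 1, i.2.2)) ++
                      (p2.1.map fun i => (i.1 + 1, i.2.1, i.2.2))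
        (result, p2.2.insert (c :: rest) result)
      else if c = 'a' then
        let p1 := fapA rest mem
        let result := p1.1.map fun i => (i.1, i.2.1 + 1, i.2.2)
        (result, p1.2.insert (c :: rest) result)
      else
        let p1 := fapA rest mem
        let result := p1.1.map fun i => (i.1, i.2.1, i.2.2 + 1)
        (result, p1.2.insert (c :: rest) result)
termination_by s.length
decreasing_by
  all_goals (simp [List.length_tail]; try omega)

def Estep_helper (data : List String) : List (List (Int × Int × Int)) :=
  let sortedData := PySem.List.sorted data (fun s => PySem.Str.len s)
  (sortedData.foldl
    (fun (acc : List (List (Int × Int × Int)) × PySem.Dict (List Char) (List (Int × Int × Int))) d =>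
      let p := fapA d.toList acc.2
      (acc.1 ++ [p.1], p.2))
    ([], PySem.Dict.empty)).1

-- ===== PORT B =====
-- Source B's bottom-up loop i = n-1 … 0 over the dp array, carried as (dp[i], dp[i+1]) while consuming the suffix.
def dpB (s : List Char) : List (Int × Int × Int) × List (Int × Int × Int) :=
  match s with
  | [] => ([(0, 0, 0)], [(0, 0, 0)])
  | c :: rest =>
    let p := dpB rest
    let v :=
      if c = 'a' ∧ rest.head? = some 'a' then
        (p.1.map fun i => (i.1, i.2.1 + 1, i.2.2)) ++ (p.2.map fun i => (i.1 + 1, i.2.1, i.2.2))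
      else if c = 'a' then
        p.1.map fun i => (i.1, i.2.1 + 1, i.2.2)
      else
        p.1.map fun i => (i.1, i.2.1, i.2.2 + 1)
    (v, p.1)

def Estep_helper_alt (data : List String) : List (List (Int × Int × Int)) :=
  (PySem.List.sorted data (fun s => PySem.Str.len s)).map (fun s => (dpB s.toList).1)

-- ===== PRECONDITION & SPEC =====
def Spec_Estep_helper (data : List String) (out : List (List (Int × Int × Int))) : Prop := out = Estep_helper_alt data
instance (data : List String) (out : List (List (Int × Int × Int))) : Decidable (Spec_Estep_helper data out) := by unfold Spec_Estep_helper; infer_instance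

-- ===== CLAIM (what is proved, stated in full; the proofs are below) =====
def Claim_equal_Estep_helper : Prop := ∀ (data : List String), Dom_Estep_helper data → Spec_Estep_helper data (Estep_helper data)

-- ===== LEMMAS AND PROOFS =====

-- the memo invariant: every stored value is the suffix-DP value of its key
def InvMem (mem : PySem.Dict (List Char) (List (Int × Int × Int))) : Prop :=
  ∀ k v, mem.get? k = some v → v = (dpB k).1

theorem dpB_snd (s : List Char) : (dpB s).2 = (dpB s.tail).1 := by
  cases s <;> simp [dpB]

theorem InvMem_insert (mem : PySem.Dict (List Char) (List (Int × Int × Int))) (k : List Char)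
    (v : List (Int × Int × Int)) (h : InvMem mem) (hv : v = (dpB k).1) : InvMem (mem.insert k v) := by
  intro k' v' h'
  rw [PySem.Dict.get?_insert] at h'
  split at h'
  · cases h'; subst ‹k' = k›; exact hv
  · exact h k' v' h'

theorem fapA_correct (s : List Char) (mem : PySem.Dict (List Char) (List (Int × Int × Int)))
    (h : InvMem mem) : (fapA s mem).1 = (dpB s).1 ∧ InvMem (fapA s mem).2 := by
  induction s, mem using fapA.induct with
  | case1 mem => exact ⟨by simp [fapA, dpB], by simpa [fapA] using ‹InvMem mem›⟩
  | case2 mem c rest v hget =>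
    refine ⟨?_, by simpa [fapA, hget] using ‹InvMem mem›⟩
    simp only [fapA, hget]
    exact ‹InvMem mem› _ _ hget
  | case3 mem c rest hget hcond p1 ih1 ih2 =>
    simp only [show p1 = fapA rest mem from rfl] at ih2
    obtain ⟨c2, r2, rfl⟩ : ∃ c2 r2, rest = c2 :: r2 := by
      cases rest with
      | nil => exfalso; simp at hcond
      | cons a b => exact ⟨a, b, rfl⟩
    obtain ⟨hc, hc2⟩ : c = 'a' ∧ c2 = 'a' := by
      have := hcond.2; simp [List.take] at this; exact this
    subst hc; subst hc2
    simp only [List.tail_cons] at ih2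
    obtain ⟨h1a, h2a⟩ := ih1 h
    obtain ⟨h1b, h2b⟩ := ih2 h2a
    have heq : fapA ('a' :: 'a' :: r2) mem =
        ((((fapA ('a' :: r2) mem).1.map fun i => (i.1, i.2.1 + 1, i.2.2)) ++
          ((fapA r2 (fapA ('a' :: r2) mem).2).1.map fun i => (i.1 + 1, i.2.1, i.2.2))),
         (fapA r2 (fapA ('a' :: r2) mem).2).2.insert ('a' :: 'a' :: r2)
           (((fapA ('a' :: r2) mem).1.map fun i => (i.1, i.2.1 + 1, i.2.2)) ++
            ((fapA r2 (fapA ('a' :: r2) mem).2).1.map fun i => (i.1 + 1, i.2.1, i.2.2)))) := by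
      rw [fapA.eq_def]; simp only [hget, if_pos hcond, List.tail_cons]
    have hdp : (dpB ('a' :: 'a' :: r2)).1 =
        ((dpB ('a' :: r2)).1.map fun i => (i.1, i.2.1 + 1, i.2.2)) ++
          ((dpB r2).1.map fun i => (i.1 + 1, i.2.1, i.2.2)) := by
      have h2 : (dpB ('a' :: r2)).2 = (dpB r2).1 := by rw [dpB_snd]; rfl
      conv_lhs => rw [dpB]
      simp [h2]
    have hfst : (fapA ('a' :: 'a' :: r2) mem).1 = (dpB ('a' :: 'a' :: r2)).1 := by
      rw [heq, hdp, h1a, h1b]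
    refine ⟨hfst, ?_⟩
    rw [heq] at hfst ⊢
    exact InvMem_insert _ _ _ h2b hfst
  | case4 mem rest hget hcond ih =>
    obtain ⟨h1, h2⟩ := ih h
    have heq : fapA ('a' :: rest) mem =
        ((fapA rest mem).1.map fun i => (i.1, i.2.1 + 1, i.2.2),
         (fapA rest mem).2.insert ('a' :: rest)
           ((fapA rest mem).1.map fun i => (i.1, i.2.1 + 1, i.2.2))) := by
      rw [fapA.eq_def]; simp only [hget, if_neg hcond, reduceIte]
    have hr : ¬(('a' : Char) = 'a' ∧ rest.head? = some 'a') := by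
      rintro ⟨-, hh⟩
      apply hcond
      cases rest with
      | nil => simp at hh
      | cons a b =>
        simp at hh; subst hh; simp
    have hh : ¬ rest.head? = some 'a' := fun hx => hr ⟨rfl, hx⟩
    have hdp : (dpB ('a' :: rest)).1 = (dpB rest).1.map fun i => (i.1, i.2.1 + 1, i.2.2) := by
      conv_lhs => rw [dpB]
      simp [hh]
    have hfst : (fapA ('a' :: rest) mem).1 = (dpB ('a' :: rest)).1 := by
      rw [heq, hdp, h1]
    refine ⟨hfst, ?_⟩
    rw [heq] at hfst ⊢
    exact InvMem_insert _ _ _ h2 hfst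
  | case5 mem c rest hget hcond hne ih =>
    obtain ⟨h1, h2⟩ := ih h
    have heq : fapA (c :: rest) mem =
        ((fapA rest mem).1.map fun i => (i.1, i.2.1, i.2.2 + 1),
         (fapA rest mem).2.insert (c :: rest)
           ((fapA rest mem).1.map fun i => (i.1, i.2.1, i.2.2 + 1))) := by
      rw [fapA.eq_def]; simp only [hget, if_neg hcond, if_neg hne]
    have hdp : (dpB (c :: rest)).1 = (dpB rest).1.map fun i => (i.1, i.2.1, i.2.2 + 1) := by
      conv_lhs => rw [dpB]
      simp [hne]
    have hfst : (fapA (c :: rest) mem).1 = (dpB (c :: rest)).1 := by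
      rw [heq, hdp, h1]
    refine ⟨hfst, ?_⟩
    rw [heq] at hfst ⊢
    exact InvMem_insert _ _ _ h2 hfst

theorem foldl_correct (xs : List String) (acc : List (List (Int × Int × Int)))
    (mem : PySem.Dict (List Char) (List (Int × Int × Int))) (h : InvMem mem) :
    (xs.foldl
      (fun (acc : List (List (Int × Int × Int)) × PySem.Dict (List Char) (List (Int × Int × Int))) d =>
        let p := fapA d.toList acc.2
        (acc.1 ++ [p.1], p.2))
      (acc, mem)).1 = acc ++ xs.map (fun s => (dpB s.toList).1) := by
  induction xs generalizing acc mem with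
  | nil => simp
  | cons d rest ih =>
    obtain ⟨h1, h2⟩ := fapA_correct d.toList mem h
    simp only [List.foldl_cons, List.map_cons]
    rw [ih _ _ h2, h1]; simp

-- ===== VERDICT (by name: the statement is the Claim_ definition above) =====
theorem Estep_helper_spec : Claim_equal_Estep_helper := by
  intro data _
  unfold Spec_Estep_helper Estep_helper Estep_helper_alt
  have h0 : InvMem PySem.Dict.empty := by
    intro k v hv; simp [PySem.Dict.get?_empty] at hv
  simpa using foldl_correct (PySem.List.sorted data (fun s => PySem.Str.len s)) [] _ h0
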